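-- pv_equiv track=rewrite | github.com/maorsarusi/python_pycharm | functional programing/תרגיל 2/targil2_2.py | perukN1
-- ===== SOURCE A (Python) =====
-- def perukN1(n):
--     Lout = []
--     while n > 10:
--         n,firstDigit =perukStep(n)
--         Lout.append(firstDigit)
--     else:
--         Lout.append(n)
--     return list(reversed(Lout))
--
-- def perukStep(n):
--     return (n//10,n%10)
-- ===== SOURCE B (Python) =====
-- def perukN1(n):
--     if n <= 10:
--         return [n]
--     return perukN1(n // 10) + [n % 10]
-- ===== Notes on version B (the rewrite author's own statement) =====
-- stated objective: simpler
-- what changed: Replaces the explicit while-loop with an accumulator list plus a final reversal by a direct structural recursion that peels the low digit and prepends the recursive result, so no intermediate list or reversal is needed.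
import Mathlib
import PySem

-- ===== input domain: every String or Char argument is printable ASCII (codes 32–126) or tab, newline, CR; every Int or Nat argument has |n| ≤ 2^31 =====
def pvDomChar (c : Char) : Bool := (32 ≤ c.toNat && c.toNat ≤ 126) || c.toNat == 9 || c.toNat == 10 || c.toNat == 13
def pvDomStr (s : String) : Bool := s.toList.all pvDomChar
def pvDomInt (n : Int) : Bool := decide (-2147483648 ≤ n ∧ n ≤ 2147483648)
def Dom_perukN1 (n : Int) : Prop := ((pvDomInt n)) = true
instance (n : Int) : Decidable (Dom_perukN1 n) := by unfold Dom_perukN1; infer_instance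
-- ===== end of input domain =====

-- B replaces the loop+append+final-reverse by a direct recursion that prepends the
-- peeled digits, producing them in natural order with no reversal (objective: simpler).

-- ===== PORT A =====
-- helper of A: perukStep(n) = (n//10, n%10)
def perukStep (n : Int) : Int × Int := (PySem.Int.floordiv n 10, PySem.Int.mod n 10)

-- the while-loop of A, carrying (n, Lout)
def perukN1Loop (n : Int) (Lout : List Int) : List Int :=
  if h : n > 10 then
    perukN1Loop (perukStep n).1 (Lout ++ [(perukStep n).2])
  else
    Lout ++ [n]
termination_by n.toNat
decreasing_by
  have he : PySem.Int.floordiv n 10 = n / 10 := PySem.Int.floordiv_eq_ediv_of_pos (by omega)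
  simp only [perukStep, he]
  omega

def perukN1 (n : Int) : List Int := (perukN1Loop n []).reverse

-- ===== PORT B =====
def perukN1_alt (n : Int) : List Int :=
  if h : n ≤ 10 then [n]
  else perukN1_alt (PySem.Int.floordiv n 10) ++ [PySem.Int.mod n 10]
termination_by n.toNat
decreasing_by
  have he : PySem.Int.floordiv n 10 = n / 10 := PySem.Int.floordiv_eq_ediv_of_pos (by omega)
  simp only [he]
  omega

-- ===== PRECONDITION & SPEC =====
def Spec_perukN1 (n : Int) (out : List Int) : Prop := out = perukN1_alt n
instance (n : Int) (out : List Int) : Decidable (Spec_perukN1 n out) := by unfold Spec_perukN1; infer_instance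

-- ===== CLAIM (what is proved, stated in full; the proofs are below) =====
def Claim_equal_perukN1 : Prop := ∀ (n : Int), Dom_perukN1 n → Spec_perukN1 n (perukN1 n)

-- ===== LEMMAS AND PROOFS =====
theorem perukN1Loop_reverse (n : Int) (acc : List Int) :
    (perukN1Loop n acc).reverse = perukN1_alt n ++ acc.reverse := by
  fun_induction perukN1Loop n acc with
  | case1 n acc h ih =>
      rw [perukN1_alt, dif_neg (show ¬ n ≤ 10 by omega)]
      simp only [perukStep] at ih ⊢
      rw [ih]
      simp
  | case2 n acc h =>
      rw [perukN1_alt, dif_pos (show n ≤ 10 by omega)]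
      simp

-- ===== VERDICT (by name: the statement is the Claim_ definition above) =====
theorem perukN1_spec : Claim_equal_perukN1 := by
  intro n _
  unfold Spec_perukN1 perukN1
  simpa using perukN1Loop_reverse n []
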